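-- pv_equiv track=rewrite | github.com/gogimandu1019/codetree-TILs | 240310/1이 되는 순간까지/until-the-moment-I-reach-one.py | f
-- ===== SOURCE A (Python) =====
-- def f(x):
--     cnt = 0
--
--     if x == 1:
--         return cnt
--
--     if x % 2 == 0:
--         cnt = f(x // 2) + 1
--     else:
--         cnt = f(x // 3) + 1
--     return cnt
-- ===== SOURCE B (Python) =====
-- def chain(x):
--     # list of successive values after x on the way down to 1
--     if x == 1:
--         return []
--     nxt = x // 2 if x % 2 == 0 else x // 3
--     return [nxt] + chain(nxt)
--
-- def f(x):
--     return len(chain(x))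
-- ===== Notes on version B (the rewrite author's own statement) =====
-- stated objective: alternative
-- what changed: Instead of a counter recurrence, B materializes the whole division trajectory as a list and returns its length.
import Mathlib
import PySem

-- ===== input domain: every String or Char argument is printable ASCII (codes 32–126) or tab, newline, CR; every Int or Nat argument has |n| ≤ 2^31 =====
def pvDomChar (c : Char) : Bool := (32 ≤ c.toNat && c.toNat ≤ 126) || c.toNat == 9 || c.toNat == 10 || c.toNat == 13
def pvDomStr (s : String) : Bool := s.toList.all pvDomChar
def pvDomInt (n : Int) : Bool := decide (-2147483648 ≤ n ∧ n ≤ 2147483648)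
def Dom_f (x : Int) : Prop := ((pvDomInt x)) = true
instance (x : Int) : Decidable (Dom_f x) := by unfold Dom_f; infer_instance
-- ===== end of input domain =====

-- B replaces A's counter recurrence by building the whole division trajectory as a list
-- and returning its length. Pre_f excludes x ≤ 0, where A raises RecursionError.

-- ===== PORT A =====
-- Literal port of A's recursion; the 'else 0' branch is a totality guard for x ≤ 0,
-- where the Python recursion never returns (outside Pre_f).
def f (x : Int) : Int :=
  if x = 1 then 0
  else if h : 1 < x then
    (if PySem.Int.mod x 2 = 0 then f (PySem.Int.floordiv x 2) + 1
     else f (PySem.Int.floordiv x 3) + 1)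
  else 0
termination_by x.toNat
decreasing_by
  · rw [PySem.Int.floordiv_eq_ediv_of_pos (by omega)]; omega
  · rw [PySem.Int.floordiv_eq_ediv_of_pos (by omega)]; omega

-- ===== PORT B =====
-- chain of Source B: the list of successive values after x down to 1; same totality guard.
def chainF (x : Int) : List Int :=
  if x = 1 then []
  else if h : 1 < x then
    let nxt : Int := if PySem.Int.mod x 2 = 0 then PySem.Int.floordiv x 2
                     else PySem.Int.floordiv x 3
    nxt :: chainF nxt
  else []
termination_by x.toNat
decreasing_by
  split <;> (rw [PySem.Int.floordiv_eq_ediv_of_pos (by omega)]; omega)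

def f_alt (x : Int) : Int := (chainF x).length

-- ===== PRECONDITION & SPEC =====
-- Pre_f excludes x ≤ 0: there the Python A never terminates (RecursionError) and B recurses forever.
def Pre_f (x : Int) : Prop := 1 ≤ x
instance (x : Int) : Decidable (Pre_f x) := by unfold Pre_f; infer_instance
def pvWitness_f : Int := (12)
def Spec_f (x : Int) (out : Int) : Prop := out = f_alt x
instance (x : Int) (out : Int) : Decidable (Spec_f x out) := by unfold Spec_f; infer_instance

-- ===== CLAIM (what is proved, stated in full; the proofs are below) =====
def Claim_equal_f : Prop := ∀ (x : Int), Dom_f x → Pre_f x → Spec_f x (f x)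

-- ===== LEMMAS AND PROOFS =====

theorem chain_len (x : Int) : ((chainF x).length : Int) = f x := by
  induction x using f.induct with
  | case1 => unfold chainF f; simp
  | case2 x h h1 h2 ih =>
    unfold chainF f
    simp only [if_neg h, dif_pos h1, if_pos h2, List.length_cons]
    push_cast
    omega
  | case3 x h h1 h2 ih =>
    unfold chainF f
    simp only [if_neg h, dif_pos h1, if_neg h2, List.length_cons]
    push_cast
    omega
  | case4 x h h1 => unfold chainF f; simp [h, h1]

-- ===== VERDICT (by name: the statement is the Claim_ definition above) =====
theorem f_spec : Claim_equal_f := by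
  intro x _ _
  unfold Spec_f f_alt
  exact (chain_len x).symm
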